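-- pv_equiv track=rewrite | github.com/bplimley/etrack | workspace/job_handler.py | put_glob_content
-- ===== SOURCE A (Python) =====
-- def split_glob(globname):
--     """
--     Return a list of N+1 parts, where N is the number of asterisks in the glob.
--
--     E.g.:
--     split_glob('asdf_*_*.h5')
--     # []'asdf_', '_', '.h5']
--     """
--
--     parts = []
--     ind = 0
--     while '*' in globname[ind:]:
--         ind2 = globname.find('*', ind)
--         parts.append(globname[ind:ind2])
--         ind = ind2 + 1      # don't include the asterisk
--     parts.append(globname[ind:])
--
--     return parts
--
-- def put_glob_content(contents, globname):
--     """
--     Put the contents list (list of string-like) into the * of the glob.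
--     """
--
--     parts = split_glob(globname)
--     if len(contents) + 1 != len(parts):
--         raise GlobError("contents don't match number of * in globname")
--
--     out = parts[0]
--     for content, part in zip(contents, parts[1:]):
--         out += content
--         out += part
--
--     return out
--
-- class GlobError(Exception):
--     pass
-- ===== SOURCE B (Python) =====
-- class GlobError(Exception):
--     pass
--
-- def put_glob_content(contents, globname):
--     """
--     Put the contents list (list of string-like) into the * of the glob.
--     """
--     if len(contents) != globname.count('*'):
--         raise GlobError("contents don't match number of * in globname")
--     it = iter(contents)
--     buf = []
--     for ch in globname:
--         if ch == '*':
--             buf.append(next(it))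
--         else:
--             buf.append(ch)
--     return ''.join(buf)
-- ===== Notes on version B (the rewrite author's own statement) =====
-- stated objective: simpler
-- what changed: Replaces the split-into-parts (repeated str.find + slicing) followed by zip-interleaving with a single character-level pass over the glob, substituting the next content for each '*'; the count check is done up front with str.count.
import Mathlib
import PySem

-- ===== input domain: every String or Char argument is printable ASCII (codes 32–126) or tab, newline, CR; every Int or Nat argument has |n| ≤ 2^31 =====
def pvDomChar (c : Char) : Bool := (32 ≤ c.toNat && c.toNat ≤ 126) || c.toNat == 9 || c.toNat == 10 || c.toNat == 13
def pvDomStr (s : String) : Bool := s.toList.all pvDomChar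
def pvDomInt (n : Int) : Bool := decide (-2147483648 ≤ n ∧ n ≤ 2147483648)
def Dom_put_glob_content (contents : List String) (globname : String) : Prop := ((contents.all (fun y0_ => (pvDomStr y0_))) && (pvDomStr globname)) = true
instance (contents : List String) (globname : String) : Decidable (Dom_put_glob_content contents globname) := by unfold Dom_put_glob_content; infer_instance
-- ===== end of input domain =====

-- B replaces split-glob-then-interleave with a single character pass over the glob (objective: simpler).


-- ===== PORT A =====
-- split_glob's while-loop (find next '*', cut the part before it, continue after it)
-- ported as a left-to-right scan accumulating the current part `acc`.
def splitGlobA (acc : List Char) (g : List Char) : List String :=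
  match g with
  | [] => [String.ofList acc]
  | c :: rest =>
      if c = '*' then String.ofList acc :: splitGlobA [] rest
      else splitGlobA (acc ++ [c]) rest

-- A raises GlobError when the length check fails; Pre_ excludes that, the port returns "" there.
def put_glob_content (contents : List String) (globname : String) : String :=
  let parts := splitGlobA [] globname.toList
  if contents.length + 1 ≠ parts.length then ""
  else (List.zip contents parts.tail).foldl
        (fun out cp => out ++ cp.1 ++ cp.2) (parts.headD "")

-- ===== PORT B =====
-- single character pass: each '*' is replaced by the next content, others are pushed
def goB (cs : List String) (g : List Char) (acc : String) : String :=
  match g with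
  | [] => acc
  | c :: rest =>
      if c = '*' then goB cs.tail rest (acc ++ cs.headD "")
      else goB cs rest (acc.push c)

-- B raises GlobError when the count check fails; Pre_ excludes that, the port returns "" there.
def put_glob_content_alt (contents : List String) (globname : String) : String :=
  if contents.length ≠ (globname.toList.filter (· = '*')).length then ""
  else goB contents globname.toList ""

-- ===== PRECONDITION & SPEC =====
-- Pre_ excludes exactly the inputs where both Pythons raise GlobError (contents count ≠ number of '*').
def Pre_put_glob_content (contents : List String) (globname : String) : Prop :=
  contents.length = (globname.toList.filter (· = '*')).length
instance (contents : List String) (globname : String) : Decidable (Pre_put_glob_content contents globname) := by unfold Pre_put_glob_content; infer_instance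

def pvWitness_put_glob_content : List String × String := (["abc", "x"], "a_*_*.h5")

def Spec_put_glob_content (contents : List String) (globname : String) (out : String) : Prop := out = put_glob_content_alt contents globname
instance (contents : List String) (globname : String) (out : String) : Decidable (Spec_put_glob_content contents globname out) := by unfold Spec_put_glob_content; infer_instance

-- ===== CLAIM (what is proved, stated in full; the proofs are below) =====
def Claim_equal_put_glob_content : Prop := ∀ (contents : List String) (globname : String), Dom_put_glob_content contents globname → Pre_put_glob_content contents globname → Spec_put_glob_content contents globname (put_glob_content contents globname)

-- ===== LEMMAS AND PROOFS =====

theorem splitGlobA_length (acc : List Char) (g : List Char) :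
    (splitGlobA acc g).length = (g.filter (· = '*')).length + 1 := by
  induction g generalizing acc with
  | nil => simp [splitGlobA]
  | cons c rest ih =>
      by_cases h : c = '*' <;> simp [splitGlobA, h, List.filter, ih]

theorem splitGlobA_ne_nil (acc : List Char) (g : List Char) : splitGlobA acc g ≠ [] := by
  have := splitGlobA_length acc g
  intro h; simp [h] at this

-- main invariant: interleaving contents with A's parts equals B's single pass
theorem interleave_eq_goB (g : List Char) (acc : List Char) (cs : List String) (s : String)
    (hlen : cs.length = (g.filter (· = '*')).length) :
    (List.zip cs (splitGlobA acc g).tail).foldl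
        (fun out cp => out ++ cp.1 ++ cp.2) (s ++ (splitGlobA acc g).headD "")
      = goB cs g (s ++ String.ofList acc) := by
  induction g generalizing acc cs s with
  | nil =>
      have : cs = [] := by simpa using List.length_eq_zero_iff.mp (by simpa using hlen)
      simp [splitGlobA, goB, this]
  | cons c rest ih =>
      by_cases h : c = '*'
      · subst h
        obtain ⟨d, cs', rfl⟩ : ∃ d cs', cs = d :: cs' := by
          cases cs with
          | nil => simp [List.filter] at hlen
          | cons d cs' => exact ⟨d, cs', rfl⟩
        have hlen' : cs'.length = (rest.filter (· = '*')).length := by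
          simpa [List.filter] using hlen
        obtain ⟨q, qt, hq⟩ : ∃ q qt, splitGlobA ([] : List Char) rest = q :: qt := by
          cases hsp : splitGlobA ([] : List Char) rest with
          | nil => exact absurd hsp (splitGlobA_ne_nil _ _)
          | cons q qt => exact ⟨q, qt, rfl⟩
        have := ih [] cs' (s ++ String.ofList acc ++ d) hlen'
        simp only [splitGlobA, goB, hq] at *
        simpa [List.zip, List.zipWith, String.append_assoc] using this
      · have := ih (acc ++ [c]) cs s (by simpa [List.filter, h] using hlen)
        have hpush : s ++ String.ofList (acc ++ [c]) = (s ++ String.ofList acc).push c := by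
          rw [String.ofList_append, String.push_eq_append, String.append_assoc]; rfl
        simp only [splitGlobA, goB, if_neg h] at *
        rw [this, hpush]

-- ===== VERDICT (by name: the statement is the Claim_ definition above) =====
theorem put_glob_content_spec : Claim_equal_put_glob_content := by
  intro contents globname _ hpre
  unfold Pre_put_glob_content at hpre
  unfold Spec_put_glob_content put_glob_content put_glob_content_alt
  have h1 : ¬(contents.length + 1 ≠ (splitGlobA [] globname.toList).length) := by
    rw [splitGlobA_length]; omega
  rw [if_neg h1, if_neg (by omega)]
  have := interleave_eq_goB globname.toList [] contents "" hpre
  simpa using this
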